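-- pv_equiv track=rewrite | github.com/Partha-png/auto_Refractor | src/utils/validators.py | validate_branch_name
-- ===== SOURCE A (Python) =====
-- def validate_branch_name(branch_name: str) -> bool:
--     """
--     Validate Git branch name follows conventions.
--
--     Args:
--         branch_name: Branch name
--
--     Returns:
--         True if valid, False otherwise
--     """
--     if not branch_name or not branch_name.strip():
--         return False
--
--     # Check for invalid characters
--     invalid_chars = [" ", "~", "^", ":", "?", "*", "[", "\\", ".."]
--     for char in invalid_chars:
--         if char in branch_name:
--             return False
--
--     # Cannot start or end with slash or dot
--     if branch_name.startswith(("/", ".")) or branch_name.endswith(("/", ".")):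
--         return False
--
--     return True
-- ===== SOURCE B (Python) =====
-- def validate_branch_name(branch_name: str) -> bool:
--     if not branch_name or not branch_name.strip():
--         return False
--     bad = {" ", "~", "^", ":", "?", "*", "[", "\\"}
--     prev = ""
--     for ch in branch_name:
--         if ch in bad or (ch == "." and prev == "."):
--             return False
--         prev = ch
--     if branch_name[0] in "/." or branch_name[-1] in "/.":
--         return False
--     return True
-- ===== Notes on version B (the rewrite author's own statement) =====
-- stated objective: simpler
-- what changed: Replaces the loop over nine substring patterns (k independent scans of the string, with '..' as a two-char substring search) by a single left-to-right pass that checks each character against a set of invalid characters and tracks the previous character to detect consecutive dots, plus direct first/last-character checks instead of startswith/endswith.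
import Mathlib
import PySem

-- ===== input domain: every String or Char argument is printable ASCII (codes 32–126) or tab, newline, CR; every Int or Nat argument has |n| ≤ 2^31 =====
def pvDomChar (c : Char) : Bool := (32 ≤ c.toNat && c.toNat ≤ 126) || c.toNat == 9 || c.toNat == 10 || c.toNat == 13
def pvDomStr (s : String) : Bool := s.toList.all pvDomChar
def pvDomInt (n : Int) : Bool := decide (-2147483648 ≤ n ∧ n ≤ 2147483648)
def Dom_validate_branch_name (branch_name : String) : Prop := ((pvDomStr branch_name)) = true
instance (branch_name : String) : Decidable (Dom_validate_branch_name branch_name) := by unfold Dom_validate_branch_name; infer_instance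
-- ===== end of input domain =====

-- B replaces A's nine independent substring scans by one left-to-right pass with an
-- invalid-character set and previous-character tracking (objective: simpler).


-- ===== PORT A =====
def validate_branch_name (branch_name : String) : Bool :=
  -- if not branch_name or not branch_name.strip(): return False
  if branch_name.toList = [] ∨ (PySem.Str.strip branch_name).toList = [] then false
  else
    -- for char in invalid_chars: if char in branch_name: return False
    let invalid : List String := [" ", "~", "^", ":", "?", "*", "[", "\\", ".."]
    if invalid.any (fun c => PySem.Str.isIn c branch_name) then false
    -- startswith/endswith on a tuple = disjunction of the members
    else if (PySem.Str.startswith branch_name "/" || PySem.Str.startswith branch_name "." ||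
             PySem.Str.endswith branch_name "/" || PySem.Str.endswith branch_name ".") then false
    else true

-- ===== PORT B =====
def pvBad : PySem.Set Char := PySem.Set.ofList [' ', '~', '^', ':', '?', '*', '[', '\\']

-- the for-loop of Source B: prev = none models Python's initial prev = "" (never a dot)
def pvScan : List Char → Option Char → Bool
  | [], _ => true
  | c :: rest, prev =>
    if pvBad.contains c || (c == '.' && prev == some '.') then false
    else pvScan rest (some c)

def validate_branch_name_alt (branch_name : String) : Bool :=
  if branch_name.toList = [] ∨ (PySem.Str.strip branch_name).toList = [] then false
  else if pvScan branch_name.toList none = false then false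
  else
    -- branch_name[0], branch_name[-1] (the guard made the string nonempty)
    match PySem.Str.pyGet? branch_name 0, PySem.Str.pyGet? branch_name (-1) with
    | some h, some t =>
        if PySem.Str.isIn (String.ofList [h]) "/." || PySem.Str.isIn (String.ofList [t]) "/." then false
        else true
    | _, _ => false

-- ===== PRECONDITION & SPEC =====
def Spec_validate_branch_name (branch_name : String) (out : Bool) : Prop := out = validate_branch_name_alt branch_name
instance (branch_name : String) (out : Bool) : Decidable (Spec_validate_branch_name branch_name out) := by unfold Spec_validate_branch_name; infer_instance

-- ===== CLAIM (what is proved, stated in full; the proofs are below) =====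
def Claim_equal_validate_branch_name : Prop := ∀ (branch_name : String), Dom_validate_branch_name branch_name → Spec_validate_branch_name branch_name (validate_branch_name branch_name)

-- ===== LEMMAS AND PROOFS =====

theorem singleton_prefix_iff (a : Char) (l : List Char) : [a] <+: l ↔ l.head? = some a := by
  cases l with
  | nil => simp
  | cons b t => simp [List.cons_prefix_cons, eq_comm]

theorem dd_cons (c : Char) (rest : List Char) :
    ['.', '.'] <:+: c :: rest ↔ (c = '.' ∧ rest.head? = some '.') ∨ ['.', '.'] <:+: rest := by
  rw [List.infix_cons_iff, List.cons_prefix_cons, singleton_prefix_iff]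
  tauto

theorem pvScan_iff (l : List Char) (p : Option Char) :
    pvScan l p = true ↔
      (∀ c ∈ l, c ∉ ([' ', '~', '^', ':', '?', '*', '[', '\\'] : List Char)) ∧
      ¬ ['.', '.'] <:+: l ∧ ¬ (p = some '.' ∧ l.head? = some '.') := by
  induction l generalizing p with
  | nil => simp [pvScan]
  | cons c rest ih =>
    rw [pvScan]
    by_cases hb : pvBad.contains c = true
    · have hc : c ∈ ([' ', '~', '^', ':', '?', '*', '[', '\\'] : List Char) := by
        have := (PySem.Set.contains_iff pvBad c).mp hb
        simpa [pvBad, PySem.Set.mem_ofList] using this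
      simp only [hb, Bool.true_or, if_true]
      constructor
      · intro h; exact absurd h (by simp)
      · rintro ⟨h1, -⟩; exact absurd hc (h1 c (by simp))
    · by_cases hd : c = '.' ∧ p = some '.'
      · simp only [hd.1, hd.2]
        simp [dd_cons]
      · have hnm : c ∉ pvBad := fun hm => hb ((PySem.Set.contains_iff pvBad c).mpr hm)
        have hcond : (pvBad.contains c || (c == '.' && p == some '.')) = false := by
          rcases Decidable.em (c = '.') with h1 | h1
          · have : ¬ p = some '.' := fun hp => hd ⟨h1, hp⟩
            simp [hnm, this]
          · simp [hnm, h1]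
        rw [hcond, if_neg (by simp)]
        rw [ih]
        have hc : c ∉ ([' ', '~', '^', ':', '?', '*', '[', '\\'] : List Char) := by
          intro hc
          exact hb ((PySem.Set.contains_iff pvBad c).mpr (by simpa [pvBad, PySem.Set.mem_ofList] using hc))
        constructor
        · rintro ⟨h1, h2, h3⟩
          refine ⟨?_, ?_, ?_⟩
          · intro x hx; rcases List.mem_cons.mp hx with rfl | hx
            · exact hc
            · exact h1 x hx
          · rw [dd_cons]; rintro (⟨hc', hh⟩ | hi)
            · exact h3 ⟨by rw [hc'], hh⟩
            · exact h2 hi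
          · rintro ⟨hp, hh⟩
            exact hd ⟨by simpa using hh, hp⟩
        · rintro ⟨h1, h2, -⟩
          refine ⟨fun x hx => h1 x (List.mem_cons_of_mem _ hx), ?_, ?_⟩
          · intro hi; exact h2 ((dd_cons c rest).mpr (Or.inr hi))
          · rintro ⟨hp, hh⟩
            injection hp with hp
            exact h2 ((dd_cons c rest).mpr (Or.inl ⟨hp, hh⟩))

-- A's invalid-characters loop fires iff some single invalid char occurs or '..' is an infix
theorem anyInvalid_iff (s : String) :
    ([" ", "~", "^", ":", "?", "*", "[", "\\", ".."] : List String).any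
        (fun c => PySem.Str.isIn c s) = true ↔
      (∃ c ∈ ([' ', '~', '^', ':', '?', '*', '[', '\\'] : List Char), c ∈ s.toList) ∨
      ['.', '.'] <:+: s.toList := by
  simp only [List.any_cons, List.any_nil, Bool.or_eq_true, Bool.false_eq_true, or_false]
  simp only [PySem.Str.isIn_iff_infix]
  have h1 : (" " : String).toList = [' '] := rfl
  have h2 : ("~" : String).toList = ['~'] := rfl
  have h3 : ("^" : String).toList = ['^'] := rfl
  have h4 : (":" : String).toList = [':'] := rfl
  have h5 : ("?" : String).toList = ['?'] := rfl
  have h6 : ("*" : String).toList = ['*'] := rfl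
  have h7 : ("[" : String).toList = ['['] := rfl
  have h8 : ("\\" : String).toList = ['\\'] := rfl
  have h9 : (".." : String).toList = ['.', '.'] := rfl
  rw [h1, h2, h3, h4, h5, h6, h7, h8, h9]
  simp only [List.singleton_infix_iff]
  constructor
  · rintro (h | h | h | h | h | h | h | h | h)
    · exact Or.inl ⟨' ', by simp, h⟩
    · exact Or.inl ⟨'~', by simp, h⟩
    · exact Or.inl ⟨'^', by simp, h⟩
    · exact Or.inl ⟨':', by simp, h⟩
    · exact Or.inl ⟨'?', by simp, h⟩
    · exact Or.inl ⟨'*', by simp, h⟩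
    · exact Or.inl ⟨'[', by simp, h⟩
    · exact Or.inl ⟨'\\', by simp, h⟩
    · exact Or.inr h
  · rintro (⟨c, hc, hm⟩ | h)
    · fin_cases hc <;> tauto
    · tauto

theorem pyGet_zero (l : List Char) (h : l ≠ []) : PySem.List.pyGet? l 0 = l.head? := by
  cases l with
  | nil => simp at h
  | cons a t => simp [PySem.List.pyGet?, PySem.List.pyIdx?]

theorem pyGet_neg_one (l : List Char) (h : l ≠ []) : PySem.List.pyGet? l (-1) = l.getLast? := by
  have hlen : 0 < l.length := List.length_pos_iff.mpr h
  simp only [PySem.List.pyGet?, PySem.List.pyIdx?]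
  rw [List.getLast?_eq_getElem?]
  split_ifs with h1 h2
  all_goals try omega
  norm_num

theorem head_mem_slashdot (h : Char) :
    PySem.Str.isIn (String.ofList [h]) "/." = true ↔ h = '/' ∨ h = '.' := by
  rw [PySem.Str.isIn_iff_infix]
  have : ("/." : String).toList = ['/', '.'] := rfl
  rw [show (String.ofList [h]).toList = [h] by simp, this, List.singleton_infix_iff]
  simp

-- ===== VERDICT (by name: the statement is the Claim_ definition above) =====
theorem validate_branch_name_spec : Claim_equal_validate_branch_name := by
  intro s _
  unfold Spec_validate_branch_name validate_branch_name validate_branch_name_alt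
  by_cases hg : s.toList = [] ∨ (PySem.Str.strip s).toList = []
  · rw [if_pos hg, if_pos hg]
  · rw [if_neg hg, if_neg hg]
    have hne : s.toList ≠ [] := fun h => hg (Or.inl h)
    by_cases hs : pvScan s.toList none = true
    · have hsc := (pvScan_iff s.toList none).mp hs
      have hany : ([" ", "~", "^", ":", "?", "*", "[", "\\", ".."] : List String).any
          (fun c => PySem.Str.isIn c s) = false := by
        rw [Bool.eq_false_iff]
        intro hmem
        rcases (anyInvalid_iff s).mp hmem with ⟨c, hc, hm⟩ | hdd
        · exact hsc.1 c hm hc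
        · exact hsc.2.1 hdd
      rw [if_neg (by rw [hany]; simp)]
      rw [if_neg (show ¬ pvScan s.toList none = false by rw [hs]; simp)]
      rw [show PySem.Str.pyGet? s 0 = PySem.List.pyGet? s.toList 0 by simp,
          show PySem.Str.pyGet? s (-1) = PySem.List.pyGet? s.toList (-1) by simp]
      rw [pyGet_zero _ hne, pyGet_neg_one _ hne]
      obtain ⟨a, ha⟩ : ∃ a, s.toList.head? = some a :=
        Option.isSome_iff_exists.mp (by simpa using hne)
      obtain ⟨lst, hlst⟩ : ∃ c, s.toList.getLast? = some c :=
        Option.isSome_iff_exists.mp (by simpa using List.getLast?_isSome.mpr hne)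
      rw [ha, hlst]
      · have hstart : ∀ c : Char,
            PySem.Str.startswith s (String.ofList [c]) = true ↔ a = c := by
          intro c
          rw [show PySem.Str.startswith s (String.ofList [c]) =
              PySem.Chars.startswith s.toList [c] by simp]
          rw [PySem.Chars.startswith_iff, singleton_prefix_iff, ha]
          simp
        have hend : ∀ c : Char,
            PySem.Str.endswith s (String.ofList [c]) = true ↔ lst = c := by
          intro c
          rw [show PySem.Str.endswith s (String.ofList [c]) =
              PySem.Chars.endswith s.toList [c] by simp]
          rw [PySem.Chars.endswith_iff]
          constructor
          · intro hsf
            rcases hsf with ⟨pre, hpre⟩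
            have : s.toList.getLast? = some c := by
              rw [← hpre]
              simp [List.getLast?_append]
            rw [hlst] at this; injection this
          · rintro rfl
            have := List.getLast?_eq_some_iff.mp hlst
            rcases this with ⟨l', hl'⟩
            exact ⟨l', hl'.symm⟩
        have hA : ∀ c : Char, PySem.Str.startswith s (String.ofList [c]) = decide (a = c) := by
          intro c; rcases Decidable.em (a = c) with h | h
          · rw [(hstart c).mpr h, decide_eq_true h]
          · rw [Bool.eq_false_iff.mpr (fun hx => h ((hstart c).mp hx)), decide_eq_false h]
        have hB : ∀ c : Char, PySem.Str.endswith s (String.ofList [c]) = decide (lst = c) := by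
          intro c; rcases Decidable.em (lst = c) with h | h
          · rw [(hend c).mpr h, decide_eq_true h]
          · rw [Bool.eq_false_iff.mpr (fun hx => h ((hend c).mp hx)), decide_eq_false h]
        have hH : PySem.Str.isIn (String.ofList [a]) "/." = (decide (a = '/') || decide (a = '.')) := by
          rcases Decidable.em (a = '/' ∨ a = '.') with h | h
          · rw [(head_mem_slashdot a).mpr h]
            rcases h with h | h <;> subst h <;> rfl
          · rw [Bool.eq_false_iff.mpr (fun hx => h ((head_mem_slashdot a).mp hx))]
            push Not at h
            rw [decide_eq_false h.1, decide_eq_false h.2]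
            rfl
        have hT : PySem.Str.isIn (String.ofList [lst]) "/." = (decide (lst = '/') || decide (lst = '.')) := by
          rcases Decidable.em (lst = '/' ∨ lst = '.') with h | h
          · rw [(head_mem_slashdot lst).mpr h]
            rcases h with h | h <;> subst h <;> rfl
          · rw [Bool.eq_false_iff.mpr (fun hx => h ((head_mem_slashdot lst).mp hx))]
            push Not at h
            rw [decide_eq_false h.1, decide_eq_false h.2]
            rfl
        rw [show ("/" : String) = String.ofList ['/'] by decide,
            show ("." : String) = String.ofList ['.'] by decide]
        rw [hA '/', hA '.', hB '/', hB '.']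
        dsimp only
        rw [hH, hT]
        by_cases c1 : a = '/' <;> by_cases c2 : a = '.' <;>
          by_cases c3 : lst = '/' <;> by_cases c4 : lst = '.' <;>
          simp [c1, c2, c3, c4]
    · have hsf : pvScan s.toList none = false := Bool.eq_false_iff.mpr hs
      have hthis : ([" ", "~", "^", ":", "?", "*", "[", "\\", ".."] : List String).any
          (fun c => PySem.Str.isIn c s) = true := by
        rw [anyInvalid_iff]
        by_contra hno
        push Not at hno
        exact hs ((pvScan_iff s.toList none).mpr
          ⟨fun c hc hmem => hno.1 c hmem hc, hno.2, by simp⟩)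
      rw [if_pos hthis, if_pos hsf]
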